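-- pv_equiv track=rewrite | github.com/masterfuzz/mtgtest | dims.py | dims
-- ===== SOURCE A (Python) =====
-- def dims(texts):
--     bag = [{}]
--     m = 0
--     for t in texts:
--         for i, w in enumerate(t.split()):
--             if i > m:
--                 bag.append({w: 1})
--                 m = i
--             else:
--                 bag[i][w] = bag[i].get(w, 0) + 1
--     return bag
-- ===== SOURCE B (Python) =====
-- def dims(texts):
--     # Column-wise: split all texts once, then count words per position index.
--     splits = [t.split() for t in texts]
--     n = max((len(ws) for ws in splits), default=0)
--     bag = []
--     for i in range(max(n, 1)):
--         d = {}
--         for ws in splits: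
--             if i < len(ws):
--                 w = ws[i]
--                 d[w] = d.get(w, 0) + 1
--         bag.append(d)
--     return bag
-- ===== Notes on version B (the rewrite author's own statement) =====
-- stated objective: alternative
-- what changed: Replaces A's text-major single pass with interleaved append/update bookkeeping (bag, running max index m) by a position-major scheme: split every text once, then for each position index build its frequency dict in one sweep over the splits.
import Mathlib
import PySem

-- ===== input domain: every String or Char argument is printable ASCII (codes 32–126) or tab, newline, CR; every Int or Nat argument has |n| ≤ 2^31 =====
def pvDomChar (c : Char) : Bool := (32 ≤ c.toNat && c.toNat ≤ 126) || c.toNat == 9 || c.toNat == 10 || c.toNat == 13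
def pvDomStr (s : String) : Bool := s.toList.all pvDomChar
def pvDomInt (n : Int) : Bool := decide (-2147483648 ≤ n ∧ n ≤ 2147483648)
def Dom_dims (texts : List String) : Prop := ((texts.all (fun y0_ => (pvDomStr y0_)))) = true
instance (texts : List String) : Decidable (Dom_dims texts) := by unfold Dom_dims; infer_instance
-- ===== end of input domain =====

-- B replaces A's text-major pass with interleaved bag/m bookkeeping by a position-major
-- scheme (split once, count each word position in its own sweep); alternative decomposition, same exact result.


-- ===== PORT A =====
-- bag is a list of dicts; the final `.map items` realises the dict → association-list convention.
def dims (texts : List String) : List (List (String × Int)) :=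
  (texts.foldl (fun st t =>
      (PySem.List.enumerate (PySem.Str.split₀ t) 0).foldl (fun st2 iw =>
        if iw.1 > st2.2 then
          (st2.1 ++ [PySem.Dict.insert PySem.Dict.empty iw.2 1], iw.1)
        else
          let d := st2.1.getD iw.1.toNat PySem.Dict.empty
          (st2.1.set iw.1.toNat (d.insert iw.2 (d.getD iw.2 0 + 1)), st2.2)) st)
    ([PySem.Dict.empty], (0 : Int))).1.map PySem.Dict.items

-- ===== PORT B =====
-- the body of Source B's inner loop over `splits` (counts the word at position i, if any)
def bstep (i : Nat) (d : PySem.Dict String Int) (ws : List String) : PySem.Dict String Int :=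
  if i < ws.length then
    let w := ws.getD i ""
    d.insert w (d.getD w 0 + 1)
  else d

def dims_alt (texts : List String) : List (List (String × Int)) :=
  let splits := texts.map PySem.Str.split₀
  let n := (splits.map List.length).foldl Nat.max 0
  ((List.range (Nat.max n 1)).foldl
    (fun bag i => bag ++ [splits.foldl (bstep i) PySem.Dict.empty]) []).map PySem.Dict.items

-- ===== PRECONDITION & SPEC =====
def Spec_dims (texts : List String) (out : List (List (String × Int))) : Prop := out = dims_alt texts
instance (texts : List String) (out : List (List (String × Int))) : Decidable (Spec_dims texts out) := by unfold Spec_dims; infer_instance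

-- ===== CLAIM (what is proved, stated in full; the proofs are below) =====
def Claim_equal_dims : Prop := ∀ (texts : List String), Dom_dims texts → Spec_dims texts (dims texts)

-- ===== LEMMAS AND PROOFS =====

-- A's inner-loop body, named (definitionally equal to the lambda in `dims`)
def istep (st2 : List (PySem.Dict String Int) × Int) (iw : Int × String) :
    List (PySem.Dict String Int) × Int :=
  if iw.1 > st2.2 then
    (st2.1 ++ [PySem.Dict.insert PySem.Dict.empty iw.2 1], iw.1)
  else
    let d := st2.1.getD iw.1.toNat PySem.Dict.empty
    (st2.1.set iw.1.toNat (d.insert iw.2 (d.getD iw.2 0 + 1)), st2.2)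

-- maximum split length, as Source B computes it
def mlen (S : List (List String)) : Nat := (S.map List.length).foldl Nat.max 0
-- number of buckets
def LL (S : List (List String)) : Nat := Nat.max (mlen S) 1
-- bucket i: position-wise count over the splits S (Source B's column dict)
def colD (S : List (List String)) (i : Nat) : PySem.Dict String Int :=
  S.foldl (bstep i) PySem.Dict.empty
-- the state of A's loop after processing exactly the splits S
def stA (S : List (List String)) : List (PySem.Dict String Int) × Int :=
  ((List.range (LL S)).map (colD S), (LL S : Int) - 1)

theorem mlen_append_singleton (S : List (List String)) (x : List String) :
    mlen (S ++ [x]) = Nat.max (mlen S) x.length := by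
  simp [mlen, List.foldl_append]

theorem length_le_mlen {S : List (List String)} {ws : List String} (h : ws ∈ S) :
    ws.length ≤ mlen S :=
  (PySem.List.le_foldl_max (S.map List.length) 0).2 _ (List.mem_map_of_mem h)

theorem foldl_bstep_of_le (S : List (List String)) (i : Nat) (d : PySem.Dict String Int)
    (h : ∀ ws ∈ S, ws.length ≤ i) : S.foldl (bstep i) d = d := by
  induction S generalizing d with
  | nil => rfl
  | cons x S ih =>
    have hx : ¬ i < x.length := by have := h x (by simp); omega
    simp only [List.foldl_cons, bstep, hx, if_false]
    exact ih d (fun ws hws => h ws (by simp [hws]))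

theorem colD_append_singleton (S : List (List String)) (x : List String) (i : Nat) :
    colD (S ++ [x]) i = bstep i (colD S i) x := by
  simp [colD, List.foldl_append]

-- extending the current split by one word changes no column except the new word's
theorem colD_extend_ne (S : List (List String)) (pre : List String) (w : String) (j : Nat)
    (hj : j ≠ pre.length) :
    colD (S ++ [pre ++ [w]]) j = colD (S ++ [pre]) j := by
  rw [colD_append_singleton, colD_append_singleton]
  unfold bstep
  by_cases h : j < pre.length
  · have h' : j < (pre ++ [w]).length := by simp; omega
    simp only [h, h', if_true]
    rw [List.getD_append pre [w] "" j h]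
  · have h' : ¬ j < (pre ++ [w]).length := by simp; omega
    rw [if_neg h, if_neg h']

-- the new word's column gains exactly one count of w
theorem colD_extend_self (S : List (List String)) (pre : List String) (w : String) :
    colD (S ++ [pre ++ [w]]) pre.length =
      PySem.Dict.insert (colD (S ++ [pre]) pre.length) w
        ((colD (S ++ [pre]) pre.length).getD w 0 + 1) := by
  have hold : colD (S ++ [pre]) pre.length = colD S pre.length := by
    rw [colD_append_singleton]; unfold bstep; simp
  rw [colD_append_singleton, hold]
  unfold bstep
  have h' : pre.length < (pre ++ [w]).length := by simp
  have hg : (pre ++ [w]).getD pre.length "" = w := by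
    simp [List.getD_eq_getElem?_getD]
  simp only [h', if_true, hg]

-- arithmetic facts about the bucket count  Nat.max (Nat.max M p) 1
theorem maxmax_of_ge (M p : Nat) (h : M ≤ p) (h1 : 1 ≤ p) :
    Nat.max (Nat.max M p) 1 = p := by
  simp only [Nat.max_def]; split_ifs <;> omega

theorem maxmax_succ_of_ge (M p : Nat) (h : M ≤ p) :
    Nat.max (Nat.max M (p + 1)) 1 = p + 1 := by
  simp only [Nat.max_def]; split_ifs <;> omega

theorem maxmax_succ_eq (M p : Nat) (hc : ¬ (M ≤ p ∧ 1 ≤ p)) :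
    Nat.max (Nat.max M (p + 1)) 1 = Nat.max (Nat.max M p) 1 := by
  simp only [Nat.max_def]; split_ifs <;> omega

theorem le_maxmax_left (M p : Nat) : M ≤ Nat.max (Nat.max M p) 1 :=
  le_trans (Nat.le_max_left M p) (Nat.le_max_left _ 1)

theorem le_maxmax_one (M p : Nat) : 1 ≤ Nat.max (Nat.max M p) 1 :=
  Nat.le_max_right _ 1

-- ONE STEP of A's inner loop, starting from the invariant state
theorem istep_key (S : List (List String)) (pre : List String) (w : String) :
    istep (stA (S ++ [pre])) ((pre.length : Int), w) = stA (S ++ [pre ++ [w]]) := by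
  have hML : mlen (S ++ [pre]) = Nat.max (mlen S) pre.length := mlen_append_singleton S pre
  have hMR : mlen (S ++ [pre ++ [w]]) = Nat.max (mlen S) (pre.length + 1) := by
    rw [mlen_append_singleton]; simp
  by_cases hc : mlen S ≤ pre.length ∧ 1 ≤ pre.length
  · -- append branch: new column
    have hLold : LL (S ++ [pre]) = pre.length := by
      unfold LL; rw [hML]; exact maxmax_of_ge _ _ hc.1 hc.2
    have hLnew : LL (S ++ [pre ++ [w]]) = pre.length + 1 := by
      unfold LL; rw [hMR]; exact maxmax_succ_of_ge _ _ hc.1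
    have hcond : ((pre.length : Int)) > (LL (S ++ [pre]) : Int) - 1 := by
      rw [hLold]; omega
    have hempty : colD S pre.length = PySem.Dict.empty :=
      foldl_bstep_of_le S pre.length _ (fun ws hws => le_trans (length_le_mlen hws) hc.1)
    unfold istep stA
    rw [if_pos hcond, hLold, hLnew, List.range_succ, List.map_append]
    refine Prod.ext ?_ (by push_cast; omega)
    simp only [List.map_cons, List.map_nil]
    congr 1
    · exact List.map_congr_left (fun j hj =>
        (colD_extend_ne S pre w j (by have := List.mem_range.1 hj; omega)).symm)
    · rw [colD_extend_self S pre w]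
      have hold : colD (S ++ [pre]) pre.length = colD S pre.length := by
        rw [colD_append_singleton]; unfold bstep; simp
      rw [hold, hempty]
      simp [PySem.Dict.getD_empty]
  · -- update branch: existing column
    have hgeM := le_maxmax_left (mlen S) pre.length
    have hge1 := le_maxmax_one (mlen S) pre.length
    have hcond : ¬ ((pre.length : Int)) > (LL (S ++ [pre]) : Int) - 1 := by
      unfold LL; rw [hML]; omega
    have hLL : LL (S ++ [pre ++ [w]]) = LL (S ++ [pre]) := by
      unfold LL; rw [hML, hMR]; exact maxmax_succ_eq _ _ hc
    have hpL : pre.length < LL (S ++ [pre]) := by unfold LL; rw [hML]; omega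
    unfold istep stA
    rw [if_neg hcond, hLL]
    simp only [Int.toNat_natCast]
    have hgetD :
        ((List.range (LL (S ++ [pre]))).map (colD (S ++ [pre]))).getD pre.length
          PySem.Dict.empty = colD (S ++ [pre]) pre.length := by
      rw [List.getD_eq_getElem?_getD, List.getElem?_map, List.getElem?_range hpL]
      rfl
    refine Prod.ext ?_ rfl
    simp only [hgetD]
    apply List.ext_getElem
    · simp
    · intro j hj1 hj2
      have hjL : j < LL (S ++ [pre]) := by simpa using hj2
      rw [List.getElem_set]
      by_cases hjp : pre.length = j
      · rw [if_pos hjp, List.getElem_map, List.getElem_range]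
        subst hjp
        exact (colD_extend_self S pre w).symm
      · rw [if_neg hjp]
        simp only [List.getElem_map, List.getElem_range]
        exact (colD_extend_ne S pre w j (fun h => hjp h.symm)).symm

-- A's inner loop over one whole split
theorem inner_loop (suf : List String) : ∀ (pre : List String) (S : List (List String)),
    (PySem.List.enumerate suf ((pre.length : Int))).foldl istep (stA (S ++ [pre]))
      = stA (S ++ [pre ++ suf]) := by
  induction suf with
  | nil => intro pre S; simp [PySem.List.enumerate_nil]
  | cons w suf ih =>
    intro pre S
    rw [PySem.List.enumerate_cons, List.foldl_cons, istep_key S pre w]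
    have h1 : ((pre.length : Int)) + 1 = (((pre ++ [w]).length : Nat) : Int) := by
      simp
    rw [h1, ih (pre ++ [w]) S]
    simp

-- A starts a new text: state unchanged when an empty split is appended
theorem stA_append_nil (S : List (List String)) : stA (S ++ [[]]) = stA S := by
  have h : LL (S ++ [[]]) = LL S := by
    unfold LL; rw [mlen_append_singleton]; simp
  unfold stA
  rw [h]
  refine Prod.ext ?_ rfl
  exact List.map_congr_left (fun j _ => by
    rw [colD_append_singleton]; unfold bstep; simp)

-- A's outer loop maintains the invariant state
theorem outer_loop (ts : List String) : ∀ (S : List (List String)),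
    ts.foldl (fun st t => (PySem.List.enumerate (PySem.Str.split₀ t) 0).foldl istep st)
      (stA S) = stA (S ++ ts.map PySem.Str.split₀) := by
  induction ts with
  | nil => intro S; simp
  | cons t ts ih =>
    intro S
    rw [List.foldl_cons]
    have h0 : (PySem.List.enumerate (PySem.Str.split₀ t) 0).foldl istep (stA S)
        = stA (S ++ [PySem.Str.split₀ t]) := by
      rw [← stA_append_nil S]
      have := inner_loop (PySem.Str.split₀ t) [] S
      simpa using this
    rw [h0, ih (S ++ [PySem.Str.split₀ t])]
    simp

theorem dims_eq_stA (texts : List String) :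
    dims texts = (stA (texts.map PySem.Str.split₀)).1.map PySem.Dict.items := by
  have hinit : ([PySem.Dict.empty], (0 : Int)) = stA [] := by
    unfold stA LL mlen colD; rfl
  unfold dims
  rw [hinit]
  have := outer_loop texts []
  simp only [List.nil_append] at this
  rw [show (fun (st : List (PySem.Dict String Int) × Int) t =>
      (PySem.List.enumerate (PySem.Str.split₀ t) 0).foldl istep st) = _ from rfl] at this
  exact congrArg (fun p => p.1.map PySem.Dict.items) this

theorem dims_alt_eq_stA (texts : List String) :
    dims_alt texts = (stA (texts.map PySem.Str.split₀)).1.map PySem.Dict.items := by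
  simp only [dims_alt, PySem.List.foldl_append_singleton_eq_map, List.nil_append]
  rfl

-- ===== VERDICT (by name: the statement is the Claim_ definition above) =====
theorem dims_spec : Claim_equal_dims := by
  intro texts _
  unfold Spec_dims
  rw [dims_eq_stA, dims_alt_eq_stA]
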